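-- pv_equiv track=rewrite | github.com/majstenmark/kattis | mosquito.py | sim
-- ===== SOURCE A (Python) =====
-- def sim(M, P, L, E, R, S, N ):
--     for _ in range(N):
--         new_P = L//R
--         new_M = P//S
--         new_L = M * E
--         P = new_P
--         M = new_M
--         L = new_L
--     return M
-- ===== SOURCE B (Python) =====
-- def sim(M, P, L, E, R, S, N):
--     # The three variables form independent 3-step chains: the returned M depends
--     # only on one seed chosen by N % 3, advanced N // 3 times by f(x) = x*E//R//S.
--     if N <= 0:
--         return M
--     r = N % 3
--     if r == 0:
--         x = M
--     elif r == 1: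
--         x = P // S
--     else:
--         x = (L // R) // S
--     for _ in range(N // 3):
--         x = (x * E // R) // S
--     return x
-- ===== Notes on version B (the rewrite author's own statement) =====
-- stated objective: faster
-- what changed: Decouples the three coupled variables into independent 3-step chains: B picks one seed by N % 3 and iterates a single scalar map f(x)=x*E//R//S only N//3 times, instead of updating all three variables N times.
import Mathlib
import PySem

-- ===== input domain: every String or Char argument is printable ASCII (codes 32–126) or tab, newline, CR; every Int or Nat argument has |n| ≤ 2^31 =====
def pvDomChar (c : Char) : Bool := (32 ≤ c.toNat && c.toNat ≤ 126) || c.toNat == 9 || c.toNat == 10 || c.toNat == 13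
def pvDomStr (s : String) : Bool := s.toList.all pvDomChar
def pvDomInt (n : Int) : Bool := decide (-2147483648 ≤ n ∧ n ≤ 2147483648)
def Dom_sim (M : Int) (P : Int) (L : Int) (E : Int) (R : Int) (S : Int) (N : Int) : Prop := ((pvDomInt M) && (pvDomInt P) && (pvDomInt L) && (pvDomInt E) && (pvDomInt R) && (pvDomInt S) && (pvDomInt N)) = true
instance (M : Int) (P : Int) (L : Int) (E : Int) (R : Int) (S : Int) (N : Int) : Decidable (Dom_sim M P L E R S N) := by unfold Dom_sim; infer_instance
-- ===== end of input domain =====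

-- B decouples the three coupled variables into independent 3-step chains: one seed chosen
-- by N % 3 is advanced N // 3 times by f(x) = x*E//R//S, instead of N triple updates.

-- ===== PORT A =====
-- one iteration of A's loop on the state (M, P, L): (P//S, L//R, M*E)
def simStep (E R S : Int) (s : Int × Int × Int) : Int × Int × Int :=
  (PySem.Int.floordiv s.2.1 S, PySem.Int.floordiv s.2.2 R, s.1 * E)

def simLoop (E R S : Int) : Nat → (Int × Int × Int) → (Int × Int × Int)
  | 0, s => s
  | n + 1, s => simLoop E R S n (simStep E R S s)

def sim (M : Int) (P : Int) (L : Int) (E : Int) (R : Int) (S : Int) (N : Int) : Int :=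
  (simLoop E R S N.toNat (M, P, L)).1

-- ===== PORT B =====
def fB (E R S x : Int) : Int :=
  PySem.Int.floordiv (PySem.Int.floordiv (x * E) R) S

-- the 'for _ in range(N//3)' loop of B
def iterF (E R S : Int) : Nat → Int → Int
  | 0, x => x
  | k + 1, x => iterF E R S k (fB E R S x)

def sim_alt (M : Int) (P : Int) (L : Int) (E : Int) (R : Int) (S : Int) (N : Int) : Int :=
  if N ≤ 0 then M
  else
    let r := PySem.Int.mod N 3
    let seed :=
      if r = 0 then M
      else if r = 1 then PySem.Int.floordiv P S
      else PySem.Int.floordiv (PySem.Int.floordiv L R) S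
    iterF E R S (PySem.Int.floordiv N 3).toNat seed

-- ===== PRECONDITION & SPEC =====
-- A raises ZeroDivisionError as soon as its loop runs once with R = 0 or S = 0.
def Pre_sim (M : Int) (P : Int) (L : Int) (E : Int) (R : Int) (S : Int) (N : Int) : Prop :=
  N ≤ 0 ∨ (R ≠ 0 ∧ S ≠ 0)
instance (M : Int) (P : Int) (L : Int) (E : Int) (R : Int) (S : Int) (N : Int) : Decidable (Pre_sim M P L E R S N) := by unfold Pre_sim; infer_instance

def pvWitness_sim : Int × Int × Int × Int × Int × Int × Int := (5, 17, 23, 2, 3, 2, 7)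

def Spec_sim (M : Int) (P : Int) (L : Int) (E : Int) (R : Int) (S : Int) (N : Int) (out : Int) : Prop := out = sim_alt M P L E R S N
instance (M : Int) (P : Int) (L : Int) (E : Int) (R : Int) (S : Int) (N : Int) (out : Int) : Decidable (Spec_sim M P L E R S N out) := by unfold Spec_sim; infer_instance

-- ===== CLAIM (what is proved, stated in full; the proofs are below) =====
def Claim_equal_sim : Prop := ∀ (M : Int) (P : Int) (L : Int) (E : Int) (R : Int) (S : Int) (N : Int), Dom_sim M P L E R S N → Pre_sim M P L E R S N → Spec_sim M P L E R S N (sim M P L E R S N)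


-- ===== LEMMAS AND PROOFS =====

-- the second and third chains of step³
def gB (E R S x : Int) : Int :=
  PySem.Int.floordiv (PySem.Int.floordiv x S * E) R
def hB (E R S x : Int) : Int :=
  PySem.Int.floordiv (PySem.Int.floordiv x R) S * E

def itg (E R S : Int) : Nat → Int → Int
  | 0, x => x
  | k + 1, x => itg E R S k (gB E R S x)
def ith (E R S : Int) : Nat → Int → Int
  | 0, x => x
  | k + 1, x => ith E R S k (hB E R S x)

lemma simLoop_three (E R S : Int) (k : Nat) :
    ∀ M P L : Int, simLoop E R S (3 * k) (M, P, L) =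
      (iterF E R S k M, itg E R S k P, ith E R S k L) := by
  induction k with
  | zero => intro M P L; rfl
  | succ k ih =>
      intro M P L
      have h3 : 3 * (k + 1) = (3 * k) + 1 + 1 + 1 := by ring
      rw [h3]
      show simLoop E R S (3 * k)
        (simStep E R S (simStep E R S (simStep E R S (M, P, L)))) = _
      have hstep : simStep E R S (simStep E R S (simStep E R S (M, P, L))) =
          (fB E R S M, gB E R S P, hB E R S L) := by
        simp [simStep, fB, gB, hB]
      rw [hstep, ih]
      rfl

lemma mod_toNat (N : Int) (h : 0 < N) : PySem.Int.mod N 3 = ((N.toNat % 3 : Nat) : Int) := by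
  rw [PySem.Int.mod_eq_emod_of_pos (by omega : (0:Int) < 3)]
  omega

lemma div_toNat (N : Int) (h : 0 < N) : (PySem.Int.floordiv N 3).toNat = N.toNat / 3 := by
  rw [PySem.Int.floordiv_eq_ediv_of_pos (by omega : (0:Int) < 3)]
  omega

-- ===== VERDICT (by name: the statement is the Claim_ definition above) =====
theorem sim_spec : Claim_equal_sim := by
  intro M P L E R S N _ _
  unfold Spec_sim
  by_cases hN : N ≤ 0
  · have h0 : N.toNat = 0 := by omega
    simp [sim, sim_alt, hN, h0, simLoop]
  · have hN' : 0 < N := by omega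
    set n := N.toNat with hn
    have hrep : n = 3 * (n / 3) + n % 3 := (Nat.div_add_mod n 3).symm
    set k := n / 3 with hk
    have hsimalt : sim_alt M P L E R S N =
        iterF E R S k
          (if ((n % 3 : Nat) : Int) = 0 then M
           else if ((n % 3 : Nat) : Int) = 1 then PySem.Int.floordiv P S
           else PySem.Int.floordiv (PySem.Int.floordiv L R) S) := by
      unfold sim_alt
      rw [if_neg hN, mod_toNat N hN', div_toNat N hN']
    have hr3 : n % 3 = 0 ∨ n % 3 = 1 ∨ n % 3 = 2 := by omega
    rcases hr3 with hr | hr | hr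
    · rw [hsimalt]
      rw [if_pos (by rw [hr]; rfl)]
      unfold sim
      rw [← hn, hrep, hr, Nat.add_zero, simLoop_three]
    · rw [hsimalt]
      rw [if_neg (by rw [hr]; decide), if_pos (by rw [hr]; rfl)]
      unfold sim
      rw [← hn, hrep, hr]
      show (simLoop E R S (3 * k) (simStep E R S (M, P, L))).1 = _
      rw [show simStep E R S (M, P, L) =
        (PySem.Int.floordiv P S, PySem.Int.floordiv L R, M * E) from rfl, simLoop_three]
    · rw [hsimalt]
      rw [if_neg (by rw [hr]; decide), if_neg (by rw [hr]; decide)]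
      unfold sim
      rw [← hn, hrep, hr]
      show (simLoop E R S (3 * k)
        (simStep E R S (simStep E R S (M, P, L)))).1 = _
      rw [show simStep E R S (simStep E R S (M, P, L)) =
        (PySem.Int.floordiv (PySem.Int.floordiv L R) S,
         PySem.Int.floordiv (M * E) R,
         PySem.Int.floordiv P S * E) from rfl, simLoop_three]
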